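-- pv_equiv track=rewrite | github.com/0x6f6f66/Algorithms-In-Python | Structy/Exhaustive_Recursion/substituting_synonyms.py | _substitute_synonyms
-- ===== SOURCE A (Python) =====
-- def _substitute_synonyms(sentence, synonyms):
--     if len(sentence) == 0:
--         return [[]]
--
--     first = sentence[0]
--     word_combinations = get_word_combinations(first, synonyms)
--     final_combinations = []
--     combinations = _substitute_synonyms(sentence[1:], synonyms)
--     for combination in combinations:
--         for word in word_combinations:
--             final_combinations.append([word, *combination])
--
--     return final_combinations
--
-- def get_word_combinations(word, synonyms):
--     if word in synonyms:
--         return synonyms[word]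
--     else:
--         return [word]
-- ===== SOURCE B (Python) =====
-- def _substitute_synonyms(sentence, synonyms):
--     result = [[]]
--     for word in reversed(sentence):
--         options = synonyms.get(word, [word])
--         result = [[opt, *comb] for comb in result for opt in options]
--     return result
-- ===== Notes on version B (the rewrite author's own statement) =====
-- stated objective: alternative
-- what changed: Replaces A's recursion-on-the-tail with an iterative fold: start from [[]] and, looping over the sentence words in reverse, prepend each word's options (via dict.get with default) to every accumulated combination, reproducing A's exact ordering.
import Mathlib
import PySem

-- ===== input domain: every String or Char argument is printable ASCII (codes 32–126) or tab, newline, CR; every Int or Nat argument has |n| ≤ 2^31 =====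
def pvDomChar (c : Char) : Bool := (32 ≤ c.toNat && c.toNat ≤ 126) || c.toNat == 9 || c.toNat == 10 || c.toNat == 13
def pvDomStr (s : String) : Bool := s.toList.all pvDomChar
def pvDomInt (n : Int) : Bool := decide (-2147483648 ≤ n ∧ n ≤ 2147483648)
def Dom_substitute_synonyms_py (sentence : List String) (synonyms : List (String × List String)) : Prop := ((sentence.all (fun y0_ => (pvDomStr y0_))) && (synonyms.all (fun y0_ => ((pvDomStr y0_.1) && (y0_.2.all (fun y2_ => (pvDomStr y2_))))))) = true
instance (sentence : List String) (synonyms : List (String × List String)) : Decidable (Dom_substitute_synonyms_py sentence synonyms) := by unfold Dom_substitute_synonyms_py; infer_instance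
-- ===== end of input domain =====

-- B replaces A's recursion by an iterative reverse fold with dict.get; same values, alternative decomposition (no speed claim).


-- ===== PORT A =====
-- 'word in synonyms' / 'synonyms[word]' on the dict (the lookup is guarded by the membership test)
def get_word_combinations_py (word : String) (synonyms : List (String × List String)) : List String :=
  if (PySem.Dict.ofList synonyms).contains word then
    (PySem.Dict.ofList synonyms).getD word []
  else [word]

def substitute_synonyms_py (sentence : List String) (synonyms : List (String × List String)) : List (List String) :=
  match sentence with
  | [] => [[]]
  | first :: rest =>
    let word_combinations := get_word_combinations_py first synonyms
    let combinations := substitute_synonyms_py rest synonyms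
    combinations.foldl (fun acc combination =>
      word_combinations.foldl (fun acc2 word => acc2 ++ [word :: combination]) acc) []

-- ===== PORT B =====
def substitute_synonyms_py_alt (sentence : List String) (synonyms : List (String × List String)) : List (List String) :=
  sentence.reverse.foldl
    (fun result word =>
      let options := (PySem.Dict.ofList synonyms).getD word [word]
      result.flatMap (fun comb => options.map (fun opt => opt :: comb)))
    [[]]

-- ===== PRECONDITION & SPEC =====
def Spec_substitute_synonyms_py (sentence : List String) (synonyms : List (String × List String)) (out : List (List String)) : Prop := out = substitute_synonyms_py_alt sentence synonyms
instance (sentence : List String) (synonyms : List (String × List String)) (out : List (List String)) : Decidable (Spec_substitute_synonyms_py sentence synonyms out) := by unfold Spec_substitute_synonyms_py; infer_instance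

-- ===== CLAIM (what is proved, stated in full; the proofs are below) =====
def Claim_equal_substitute_synonyms_py : Prop := ∀ (sentence : List String) (synonyms : List (String × List String)), Dom_substitute_synonyms_py sentence synonyms → Spec_substitute_synonyms_py sentence synonyms (substitute_synonyms_py sentence synonyms)

-- ===== LEMMAS AND PROOFS =====

-- A's membership-guarded lookup is B's dict.get(word, [word])
theorem gwc_eq_getD (word : String) (synonyms : List (String × List String)) :
    get_word_combinations_py word synonyms = (PySem.Dict.ofList synonyms).getD word [word] := by
  unfold get_word_combinations_py
  rw [PySem.Dict.contains_eq_isSome_get?]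
  cases hg : (PySem.Dict.ofList synonyms).get? word with
  | none => simp [PySem.Dict.getD_eq_get?_getD, hg]
  | some v => simp [PySem.Dict.getD_eq_get?_getD, hg]

-- one unfolding step of A as a flatMap
theorem portA_cons (w : String) (rest : List String) (synonyms : List (String × List String)) :
    substitute_synonyms_py (w :: rest) synonyms
      = (substitute_synonyms_py rest synonyms).flatMap
          (fun c => (get_word_combinations_py w synonyms).map (fun x => x :: c)) := by
  show (substitute_synonyms_py rest synonyms).foldl
      (fun acc c => (get_word_combinations_py w synonyms).foldl (fun a x => a ++ [x :: c]) acc) []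
      = _
  simp only [PySem.List.foldl_append_singleton_eq_map]
  rw [PySem.List.foldl_append_eq_flatMap]
  simp

-- one unfolding step of B: the last word processed is the head of the sentence
theorem portB_cons (w : String) (rest : List String) (synonyms : List (String × List String)) :
    substitute_synonyms_py_alt (w :: rest) synonyms
      = (substitute_synonyms_py_alt rest synonyms).flatMap
          (fun c => ((PySem.Dict.ofList synonyms).getD w [w]).map (fun x => x :: c)) := by
  unfold substitute_synonyms_py_alt
  rw [List.reverse_cons, List.foldl_append]
  rfl

-- A = B on all inputs
theorem ports_agree (sentence : List String) (synonyms : List (String × List String)) :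
    substitute_synonyms_py sentence synonyms = substitute_synonyms_py_alt sentence synonyms := by
  induction sentence with
  | nil => rfl
  | cons w rest ih =>
    rw [portA_cons, portB_cons, ih, gwc_eq_getD]

-- ===== VERDICT (by name: the statement is the Claim_ definition above) =====
theorem substitute_synonyms_py_spec : Claim_equal_substitute_synonyms_py := by
  intro sentence synonyms _
  exact ports_agree sentence synonyms
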